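-- pv_equiv track=rewrite | github.com/dmiyakawa/atcoder-workspace | abc227/D/main.py | solve_wa_tle
-- ===== SOURCE A (Python) =====
-- def solve_wa_tle(K, A):
--     # 遅いだけでなく論理的に間違い
--     #
--     # 構成的な方法で（具体的に作っていく場合に）正しくなるのは
--     # 「Ai が大きい方からK個選んで「一つ」プロジェクトを作る場合」
--     # であって
--     # 「Ai が大きい方からK*X個選んで「X個」プロジェクトを作る場合」
--     # ではない。後者だと、2個め以降を取るプロセスでAiが上位K個に含まれない部署を選び始めてしまい、不当に余る結果になる
--     ans = 0
--     while True:
--         prev_ans = ans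
--         A = sorted(a for a in A if a > 0)
--         if len(A) < K:
--             break
--         j = len(A) - K
--         val = A[j]
--         ans += val
--         for l in range(K):
--             A[j + l] -= val
--
--         if prev_ans == ans:
--             break
--
--     return ans
-- ===== SOURCE B (Python) =====
-- def solve_wa_tle(K, A):
--     # Sort the positive values ONCE; each round, instead of re-sorting the whole
--     # list, merge the (already sorted) reduced top-K survivors back into the
--     # untouched lower part.
--     s = sorted(a for a in A if a > 0)
--     ans = 0
--     while len(s) >= K:
--         j = len(s) - K
--         val = s[j]
--         ans += val
--         lower = s[:j]
--         upper = [a - val for a in s[j:] if a > val]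
--         merged = []
--         i = t = 0
--         while i < len(lower) and t < len(upper):
--             if lower[i] <= upper[t]:
--                 merged.append(lower[i])
--                 i += 1
--             else:
--                 merged.append(upper[t])
--                 t += 1
--         merged.extend(lower[i:])
--         merged.extend(upper[t:])
--         s = merged
--     return ans
-- ===== Notes on version B (the rewrite author's own statement) =====
-- stated objective: alternative
-- what changed: B sorts the positive values once and, each round, merges the reduced top-K survivors back into the untouched sorted lower part (linear merge) instead of re-filtering and re-sorting the whole list every iteration.
import Mathlib
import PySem

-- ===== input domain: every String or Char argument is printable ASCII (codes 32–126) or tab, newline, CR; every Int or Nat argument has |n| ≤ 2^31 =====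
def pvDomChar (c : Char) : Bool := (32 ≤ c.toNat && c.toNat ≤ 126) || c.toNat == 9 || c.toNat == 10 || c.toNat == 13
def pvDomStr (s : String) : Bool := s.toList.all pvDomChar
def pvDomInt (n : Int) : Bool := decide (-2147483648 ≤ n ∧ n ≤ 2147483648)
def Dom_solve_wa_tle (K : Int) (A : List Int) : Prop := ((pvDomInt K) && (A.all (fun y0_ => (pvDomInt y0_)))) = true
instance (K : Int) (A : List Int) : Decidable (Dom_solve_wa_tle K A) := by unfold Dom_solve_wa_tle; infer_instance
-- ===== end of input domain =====

-- B replaces A's per-round re-filter-and-re-sort of the whole list by one initial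
-- sort plus a linear merge of the reduced top-K survivors into the sorted lower part.
-- (Return value only; A rebinds its local `A`, neither mutates the caller's list.)

-- ===== PORT A =====
-- sorted(a for a in X if a > 0)  (used literally by both Pythons)
def pvSortPos (xs : List Int) : List Int :=
  PySem.List.sorted (xs.filter (fun a => decide (0 < a))) (fun x => x) false

-- the while-True loop of A; fuel (|A|+1 at the call) only makes the loop total
def pvLoopA (K : Int) : Nat → Int → List Int → Int
  | 0, ans, _ => ans
  | fuel+1, ans, t =>
    let s := pvSortPos t
    if (s.length : Int) < K then ans
    else
      let j : Int := (s.length : Int) - K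
      let val := PySem.List.pyGetD s j 0
      let ans' := ans + val
      -- for l in range(K): A[j+l] -= val
      let s' := (PySem.List.pyRange 0 K 1).foldl
        (fun t2 l => PySem.List.pySetD t2 (j + l) (PySem.List.pyGetD t2 (j + l) 0 - val)) s
      if ans = ans' then ans' else pvLoopA K fuel ans' s'

def solve_wa_tle (K : Int) (A : List Int) : Int := pvLoopA K (A.length + 1) 0 A

-- ===== PORT B =====
-- Source B's hand-written two-pointer merge of two lists (remainders appended)
def pvMergeB : List Int → List Int → List Int
  | [], ys => ys
  | x :: xs, [] => x :: xs
  | x :: xs, y :: ys =>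
    if x ≤ y then x :: pvMergeB xs (y :: ys) else y :: pvMergeB (x :: xs) ys

-- the while len(s) >= K loop of B; same totalising fuel
def pvLoopB (K : Int) : Nat → Int → List Int → Int
  | 0, ans, _ => ans
  | fuel+1, ans, s =>
    if (s.length : Int) < K then ans
    else
      let j : Int := (s.length : Int) - K
      let val := PySem.List.pyGetD s j 0
      let lower := PySem.List.slice s none (some j)
      let upper := ((PySem.List.slice s (some j) none).filter
          (fun a => decide (val < a))).map (fun a => a - val)
      pvLoopB K fuel (ans + val) (pvMergeB lower upper)

def solve_wa_tle_alt (K : Int) (A : List Int) : Int :=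
  pvLoopB K (A.length + 1) 0 (pvSortPos A)

-- ===== PRECONDITION & SPEC =====
-- Pre_ excludes K ≤ 0, where A raises IndexError (A[len(A)-K] with len(A)-K ≥ len(A)).
def Pre_solve_wa_tle (K : Int) (A : List Int) : Prop := 1 ≤ K
instance (K : Int) (A : List Int) : Decidable (Pre_solve_wa_tle K A) := by
  unfold Pre_solve_wa_tle; infer_instance
def pvWitness_solve_wa_tle : Int × List Int := (2, [3, 1, 4])

def Spec_solve_wa_tle (K : Int) (A : List Int) (out : Int) : Prop := out = solve_wa_tle_alt K A
instance (K : Int) (A : List Int) (out : Int) : Decidable (Spec_solve_wa_tle K A out) := by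
  unfold Spec_solve_wa_tle; infer_instance

-- ===== CLAIM (what is proved, stated in full; the proofs are below) =====
def Claim_equal_solve_wa_tle : Prop := ∀ (K : Int) (A : List Int), Dom_solve_wa_tle K A → Pre_solve_wa_tle K A → Spec_solve_wa_tle K A (solve_wa_tle K A)

-- ===== LEMMAS AND PROOFS =====

lemma pvMergeB_perm (xs ys : List Int) : (pvMergeB xs ys).Perm (xs ++ ys) := by
  fun_induction pvMergeB with
  | case1 ys => simp
  | case2 x xs => simp
  | case3 x xs y ys h ih => exact (ih.cons x)
  | case4 x xs y ys h ih =>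
    exact (ih.cons y).trans (List.Perm.symm (List.perm_middle))

lemma pvMergeB_mem (xs ys : List Int) (a : Int) (h : a ∈ pvMergeB xs ys) :
    a ∈ xs ∨ a ∈ ys := by
  have := (pvMergeB_perm xs ys).mem_iff.mp h
  simpa using this

lemma pvMergeB_pairwise (xs ys : List Int)
    (hx : xs.Pairwise (· ≤ ·)) (hy : ys.Pairwise (· ≤ ·)) :
    (pvMergeB xs ys).Pairwise (· ≤ ·) := by
  fun_induction pvMergeB with
  | case1 ys => simpa
  | case2 x xs => exact hx
  | case3 x xs y ys h ih =>
    refine List.Pairwise.cons ?_ (ih hx.tail hy)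
    intro b hb
    rcases pvMergeB_mem _ _ _ hb with h1 | h1
    · exact List.rel_of_pairwise_cons hx h1
    · rcases List.mem_cons.mp h1 with rfl | h2
      · exact h
      · exact le_trans h (List.rel_of_pairwise_cons hy h2)
  | case4 x xs y ys h ih =>
    rw [Int.not_le] at h
    refine List.Pairwise.cons ?_ (ih hx hy.tail)
    intro b hb
    rcases pvMergeB_mem _ _ _ hb with h1 | h1
    · rcases List.mem_cons.mp h1 with rfl | h2
      · exact le_of_lt h
      · exact le_trans (le_of_lt h) (List.rel_of_pairwise_cons hx h2)
    · exact List.rel_of_pairwise_cons hy h1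

lemma pvSubLoop_spec (post pre : List Int) (val : Int) :
    (PySem.List.pyRange 0 (post.length : Int) 1).foldl
      (fun t2 l => PySem.List.pySetD t2 ((pre.length : Int) + l)
        (PySem.List.pyGetD t2 ((pre.length : Int) + l) 0 - val)) (pre ++ post)
    = pre ++ post.map (fun a => a - val) := by
  induction post generalizing pre with
  | nil => simp [PySem.List.pyRange_one_eq_nil]
  | cons x rest ih =>
    rw [PySem.List.pyRange_one_cons (by simp)]
    simp only [List.foldl_cons]
    have hget : PySem.List.pyGetD (pre ++ x :: rest) ((pre.length : Int) + 0) 0 = x := by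
      simp [PySem.List.pyGetD_natCast]
    have hset : PySem.List.pySetD (pre ++ x :: rest) ((pre.length : Int) + 0) (x - val)
        = pre ++ (x - val) :: rest := by
      simp [PySem.List.pySetD_natCast]
    rw [hget, hset]
    have hrange : PySem.List.pyRange (0+1) ((x :: rest).length : Int) 1
        = (PySem.List.pyRange 0 (rest.length : Int) 1).map (fun l => l + 1) := by
      simp only [PySem.List.pyRange_one]
      simp [List.map_map, Function.comp]
      omega
    rw [hrange, List.foldl_map]
    have hfun : (fun (t2 : List Int) (l : Int) => PySem.List.pySetD t2 ((pre.length : Int) + (l + 1))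
          (PySem.List.pyGetD t2 ((pre.length : Int) + (l + 1)) 0 - val))
        = (fun (t2 : List Int) (l : Int) => PySem.List.pySetD t2 (((pre ++ [x - val]).length : Int) + l)
          (PySem.List.pyGetD t2 (((pre ++ [x - val]).length : Int) + l) 0 - val)) := by
      funext t2 l
      have : (pre.length : Int) + (l + 1) = ((pre ++ [x - val]).length : Int) + l := by
        simp; omega
      rw [this]
    rw [hfun]
    have := ih (pre ++ [x - val])
    simp only [List.append_assoc, List.singleton_append] at this
    rw [this]
    simp

lemma pvSortPos_mem_pos (t : List Int) (a : Int) (ha : a ∈ pvSortPos t) : 0 < a := by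
  unfold pvSortPos at ha
  rw [PySem.List.mem_sorted] at ha
  have := List.of_mem_filter ha
  simpa using this

lemma pvSortPos_pairwise (t : List Int) : (pvSortPos t).Pairwise (· ≤ ·) := by
  have := PySem.List.sorted_pairwise (t.filter (fun a => decide (0 < a))) (fun x : Int => x) 
  exact this

lemma pvLoop_eq (K : Int) (hK : 1 ≤ K) :
    ∀ (fuel : Nat) (ans : Int) (t : List Int),
      pvLoopA K fuel ans t = pvLoopB K fuel ans (pvSortPos t) := by
  intro fuel
  induction fuel with
  | zero => intro ans t; rfl
  | succ n ih =>
    intro ans t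
    simp only [pvLoopA, pvLoopB]
    by_cases hlt : ((pvSortPos t).length : Int) < K
    · simp [hlt]
    · simp only [if_neg hlt]
      set s := pvSortPos t with hs
      set j : Int := (s.length : Int) - K with hj
      have hj0 : 0 ≤ j := by omega
      have hjlt : j < (s.length : Int) := by omega
      set j0 : Nat := j.toNat with hj0n
      have hjcast : (j0 : Int) = j := Int.toNat_of_nonneg hj0
      have hj0le : j0 ≤ s.length := by omega
      set pre : List Int := s.take j0 with hpre
      set post : List Int := s.drop j0 with hpost
      have hsplit : pre ++ post = s := List.take_append_drop j0 s
      have hprelen : pre.length = j0 := by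
        rw [hpre, List.length_take]; omega
      have hpostlen : (post.length : Int) = K := by
        rw [hpost, List.length_drop]; omega
      set val : Int := PySem.List.pyGetD s j 0 with hvaldef
      have hvmem : val ∈ s := by
        apply PySem.List.pyGetD_mem
        constructor <;> omega
      have hvpos : 0 < val := pvSortPos_mem_pos t val (hs ▸ hvmem)
      -- A's in-place subtraction loop = lower part ++ shifted upper part
      have hfold : (PySem.List.pyRange 0 K 1).foldl
          (fun t2 l => PySem.List.pySetD t2 (j + l)
            (PySem.List.pyGetD t2 (j + l) 0 - val)) s
          = pre ++ post.map (fun a => a - val) := by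
        have h1 : j = ((pre.length : Int)) := by rw [hprelen, hjcast]
        have h2 : K = ((post.length : Int)) := hpostlen.symm
        rw [h1, h2, ← hsplit]
        exact pvSubLoop_spec post pre val
      -- B's slices
      have hlower : PySem.List.slice s none (some j) = pre := by
        rw [← hjcast, PySem.List.slice_to_natCast]
      have hupper : PySem.List.slice s (some j) none = post := by
        rw [← hjcast, PySem.List.slice_from_natCast]
      -- B's comprehension = positive filter of the shifted upper part
      have hcompr : ((post.filter (fun a => decide (val < a))).map (fun a => a - val))
          = (post.map (fun a => a - val)).filter (fun b => decide (0 < b)) := by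
        rw [List.filter_map]
        congr 1
        apply List.filter_congr
        intro a _
        simp [Function.comp, Int.sub_pos]
      -- re-sorting A's next state = B's merge
      have hsortnext : pvSortPos (pre ++ post.map (fun a => a - val))
          = pvMergeB pre ((post.map (fun a => a - val)).filter (fun b => decide (0 < b))) := by
        have hspw : s.Pairwise (· ≤ ·) := hs ▸ pvSortPos_pairwise t
        have hprepw : pre.Pairwise (· ≤ ·) :=
          hspw.sublist (hpre ▸ List.take_sublist j0 s) |>.imp (fun h => h)
        have hpostpw : post.Pairwise (· ≤ ·) :=
          hspw.sublist (hpost ▸ List.drop_sublist j0 s) |>.imp (fun h => h)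
        have hfpw : ((post.map (fun a => a - val)).filter (fun b => decide (0 < b))).Pairwise (· ≤ ·) := by
          apply List.Pairwise.filter
          rw [List.pairwise_map]
          exact hpostpw.imp (by omega)
        have hprepos : pre.filter (fun a => decide (0 < a)) = pre := by
          apply List.filter_eq_self.mpr
          intro a ha
          have : a ∈ s := hsplit ▸ List.mem_append_left post ha
          simpa using pvSortPos_mem_pos t a (hs ▸ this)
        unfold pvSortPos
        rw [List.filter_append, hprepos]
        apply PySem.List.sorted_id_eq_of_perm_of_pairwise
        · exact (pvMergeB_perm _ _).trans (by rfl)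
        · exact pvMergeB_pairwise _ _ hprepw hfpw
      have hne : ¬ (ans = ans + val) := by omega
      rw [if_neg hne, hfold, hlower, hupper, hcompr, ← hsortnext]
      exact ih (ans + val) (pre ++ post.map (fun a => a - val))

-- ===== VERDICT (by name: the statement is the Claim_ definition above) =====
theorem solve_wa_tle_spec : Claim_equal_solve_wa_tle := by
  intro K A _ hpre
  unfold Spec_solve_wa_tle solve_wa_tle solve_wa_tle_alt
  exact pvLoop_eq K hpre (A.length + 1) 0 A
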